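-- pv_equiv track=rewrite | github.com/yeseong31/coding-test | Programmers/Level1&2/영어_끝말잇기.py | solution
-- ===== SOURCE A (Python) =====
-- def solution(n, words):
--     # 이전에 등장했던 단어는 사용할 수 없음
--     used = set()
--     used.add(words[0])
--     prev = words[0][-1]
--     cnt = 1
--
--     for word in words[1:]:
--         # 이전에 등장했거나 끝말잇기가 아닌 단어라면
--         if word in used or prev != word[0]:
--             return [cnt % n + 1, cnt // n + 1]
--
--         used.add(word)
--         cnt += 1
--         prev = word[-1]
--
--     return [0, 0]
-- ===== SOURCE B (Python) =====
-- def solution(n, words):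
--     m = len(words)
--     # earliest index whose word does not continue the chain ("" never continues)
--     chain_break = m
--     for i in range(1, m):
--         if words[i][:1] != words[i - 1][-1:]:
--             chain_break = i
--             break
--     # earliest index whose word already appeared before it
--     dup = m
--     seen = set()
--     for i, w in enumerate(words):
--         if w in seen:
--             dup = i
--             break
--         seen.add(w)
--     idx = min(chain_break, dup)
--     if idx == m:
--         return [0, 0]
--     return [idx % n + 1, idx // n + 1]
-- ===== Notes on version B (the rewrite author's own statement) =====
-- stated objective: alternative
-- what changed: Replaces A's single interleaved scan (growing used-set + prev-letter state with an early return) by two independent passes - the first chain-break index (via one-character slices, so empty words just count as a break) and the first repeated-word index - combined with min() and one final formatting step.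
import Mathlib
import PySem

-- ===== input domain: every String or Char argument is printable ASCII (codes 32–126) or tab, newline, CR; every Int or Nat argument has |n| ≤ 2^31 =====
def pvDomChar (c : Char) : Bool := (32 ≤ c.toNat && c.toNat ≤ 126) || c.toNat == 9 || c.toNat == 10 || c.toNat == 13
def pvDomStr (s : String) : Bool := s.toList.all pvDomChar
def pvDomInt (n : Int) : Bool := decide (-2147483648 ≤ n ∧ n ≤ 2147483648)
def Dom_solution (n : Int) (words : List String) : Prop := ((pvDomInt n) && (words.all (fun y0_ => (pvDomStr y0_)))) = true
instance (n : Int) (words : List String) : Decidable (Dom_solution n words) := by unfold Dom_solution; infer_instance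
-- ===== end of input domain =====

-- B replaces A's single interleaved scan (used-set + prev letter + early return) by two independent
-- first-failure passes combined with min (alternative decomposition, same cost).

-- word[-1] as a Char with a default (the default is never reached on admitted inputs)
def pvLastC (w : String) : Char := (PySem.Str.pyGet? w (-1)).getD ' '

-- ===== PORT A =====
-- 'prev != word[0]' with word possibly "": pyGet? returns none there (Python raises; outside Pre_)
def solutionLoopA (n : Int) : List String → PySem.Set String → Char → Int → List Int
  | [], _, _, _ => [0, 0]
  | word :: rest, used, prev, cnt =>
    if PySem.Set.contains used word || decide (PySem.Str.pyGet? word 0 ≠ some prev) then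
      [PySem.Int.mod cnt n + 1, PySem.Int.floordiv cnt n + 1]
    else
      solutionLoopA n rest (PySem.Set.add used word) (pvLastC word) (cnt + 1)

def solution (n : Int) (words : List String) : List Int :=
  match words with
  | [] => [0, 0]   -- Python raises IndexError at words[0] here (outside Pre_)
  | w0 :: rest => solutionLoopA n rest (PySem.Set.add PySem.Set.empty w0) (pvLastC w0) 1

-- ===== PORT B =====
-- w[:1] and w[-1:] as (possibly empty) one-character slices, on code points
def pvHead1 (w : String) : List Char := PySem.List.slice w.toList (some 0) (some 1)
def pvTail1 (w : String) : List Char := PySem.List.slice w.toList (some (-1)) none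

-- first index i ≥ start whose word does not continue the chain (p = word at start-1)
def chainBreakB : String → List String → Nat → Nat
  | _, [], i => i
  | p, w :: ws, i => if pvHead1 w ≠ pvTail1 p then i else chainBreakB w ws (i + 1)

-- first index i whose word already appeared before it
def dupB : List String → PySem.Set String → Nat → Nat
  | [], _, i => i
  | w :: ws, seen, i =>
    if PySem.Set.contains seen w then i else dupB ws (PySem.Set.add seen w) (i + 1)

def solution_alt (n : Int) (words : List String) : List Int :=
  let m := words.length
  let cb : Nat := match words with | [] => m | w0 :: rest => chainBreakB w0 rest 1
  let d : Nat := dupB words PySem.Set.empty 0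
  let idx := min cb d
  if idx = m then [0, 0]
  else [PySem.Int.mod (idx : Int) n + 1, PySem.Int.floordiv (idx : Int) n + 1]

-- ===== PRECONDITION & SPEC =====
-- failAtB words i: the rule is broken at index i (a repeat of an earlier word, or word i does not
-- start with the last letter of word i-1; an empty word at i or i-1 counts as a break, as the
-- missing character cannot match).  A closed-form test on the input only.
def failAtB (words : List String) (i : Nat) : Bool :=
  decide (1 ≤ i) && decide (i < words.length) &&
  (decide (words.getD i "" ∈ words.take i) ||
   decide (PySem.Str.pyGet? (words.getD i "") 0 ≠ PySem.Str.pyGet? (words.getD (i - 1) "") (-1)))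

-- Pre_ excludes exactly the inputs where Python A raises: the empty list and an empty word that is
-- reached — i.e. not strictly preceded by an earlier rule break — give IndexError, and n = 0 with
-- some rule break gives ZeroDivisionError; on every input A returns on, Pre_ holds.
def Pre_solution (n : Int) (words : List String) : Prop :=
  words ≠ [] ∧
  (∀ j < words.length, words.getD j "" = "" → ∃ i < j, failAtB words i = true) ∧
  (n ≠ 0 ∨ ∀ i < words.length, failAtB words i = false)
instance (n : Int) (words : List String) : Decidable (Pre_solution n words) := by
  unfold Pre_solution; infer_instance

def pvWitness_solution : Int × List String := (3, ["ab", "ba", "ax"])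

def Spec_solution (n : Int) (words : List String) (out : List Int) : Prop := out = solution_alt n words
instance (n : Int) (words : List String) (out : List Int) : Decidable (Spec_solution n words out) := by unfold Spec_solution; infer_instance

-- ===== CLAIM (what is proved, stated in full; the proofs are below) =====
def Claim_equal_solution : Prop := ∀ (n : Int) (words : List String), Dom_solution n words → Pre_solution n words → Spec_solution n words (solution n words)

-- ===== LEMMAS AND PROOFS =====

-- chain pass restated over the carried last character, with A's option-valued break test
def chainC : Char → List String → Nat → Nat
  | _, [], i => i
  | c, w :: ws, i =>
    if PySem.List.pyGet? w.toList 0 ≠ some c then i else chainC (pvLastC w) ws (i + 1)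

lemma drop_length_sub_one (l : List Char) (c : Char) (h : l.getLast? = some c) :
    l.drop (l.length - 1) = [c] := by
  induction l with
  | nil => simp at h
  | cons x t ih =>
    cases t with
    | nil => simp_all
    | cons y u =>
      simp only [List.getLast?_cons_cons] at h
      have := ih h
      simpa using this

lemma pyGet_neg_one_of_ne_nil (w : String) (h : w.toList ≠ []) :
    PySem.List.pyGet? w.toList (-1) = some (pvLastC w) := by
  rw [PySem.List.pyGet?_neg_one]
  cases hg : w.toList.getLast? with
  | none => exact absurd (List.getLast?_eq_none_iff.mp hg) h
  | some c => simp [pvLastC, PySem.List.pyGet?_neg_one, hg]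

lemma tail1_eq (p : String) (c : Char) (hp : PySem.List.pyGet? p.toList (-1) = some c) :
    pvTail1 p = [c] := by
  rw [PySem.List.pyGet?_neg_one] at hp
  unfold pvTail1
  rw [PySem.List.slice_from_neg_one]
  exact drop_length_sub_one _ _ hp

lemma head1_break_iff (w : String) (c : Char) :
    (pvHead1 w ≠ [c]) ↔ PySem.List.pyGet? w.toList 0 ≠ some c := by
  unfold pvHead1
  cases hw : w.toList with
  | nil => simp [PySem.List.slice, PySem.List.pyGet?]
  | cons ch rest =>
    have h1 : PySem.List.slice (ch :: rest) (some (0 : Int)) (some (1 : Int)) = [ch] := by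
      have := PySem.List.slice_natCast (xs := ch :: rest) (a := 0) (b := 1)
      simpa using this
    rw [h1, PySem.List.pyGet?_zero_cons]
    simp

lemma chainBreakB_eq_chainC (ws : List String) : ∀ (p : String) (c : Char) (i : Nat),
    PySem.List.pyGet? p.toList (-1) = some c → chainBreakB p ws i = chainC c ws i := by
  induction ws with
  | nil => intro p c i _; rfl
  | cons w ws ih =>
    intro p c i hp
    simp only [chainBreakB, chainC]
    rw [tail1_eq p c hp]
    by_cases h : PySem.List.pyGet? w.toList 0 ≠ some c
    · simp [(head1_break_iff w c).mpr h, h]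
    · rw [not_not] at h
      have hbr : ¬ (pvHead1 w ≠ [c]) := by rw [head1_break_iff]; simp [h]
      have hwne : w.toList ≠ [] := by
        intro hnil
        rw [hnil] at h
        simp [PySem.List.pyGet?] at h
      have := ih w (pvLastC w) (i + 1) (pyGet_neg_one_of_ne_nil w hwne)
      simp [hbr, h, this]

lemma le_chainC (ws : List String) : ∀ (c : Char) (i : Nat), i ≤ chainC c ws i := by
  induction ws with
  | nil => intro c i; simp [chainC]
  | cons w ws ih =>
    intro c i
    by_cases h : PySem.List.pyGet? w.toList 0 ≠ some c
    · simp [chainC, h]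
    · have := ih (pvLastC w) (i + 1)
      simp only [chainC, h, if_false]
      omega

lemma le_dupB (ws : List String) : ∀ (s : PySem.Set String) (i : Nat), i ≤ dupB ws s i := by
  induction ws with
  | nil => intro s i; simp [dupB]
  | cons w ws ih =>
    intro s i
    by_cases h : w ∈ s
    · simp [dupB, h]
    · have := ih (PySem.Set.add s w) (i + 1)
      simp only [dupB, PySem.Set.contains_eq_listContains, List.contains_eq_mem, h,
        decide_false, Bool.false_eq_true, if_false]
      omega

lemma loopA_eq (n : Int) (ws : List String) : ∀ (used : PySem.Set String) (prev : Char) (i : Nat),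
    solutionLoopA n ws used prev (i : Int) =
      (if min (chainC prev ws i) (dupB ws used i) = i + ws.length then [0, 0]
       else [PySem.Int.mod ((min (chainC prev ws i) (dupB ws used i) : Nat) : Int) n + 1,
             PySem.Int.floordiv ((min (chainC prev ws i) (dupB ws used i) : Nat) : Int) n + 1]) := by
  induction ws with
  | nil => intro used prev i; simp [solutionLoopA, chainC, dupB]
  | cons w ws ih =>
    intro used prev i
    by_cases hd : w ∈ used
    · -- duplicate hit: A returns here, dupB stops at i
      have h1 : dupB (w :: ws) used i = i := by simp [dupB, hd]
      have h2 : i ≤ chainC prev (w :: ws) i := le_chainC _ _ _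
      have h3 : min (chainC prev (w :: ws) i) (dupB (w :: ws) used i) = i := by
        rw [h1]; omega
      simp [solutionLoopA, hd, h3]
    · by_cases hc : PySem.List.pyGet? w.toList 0 = some prev
      · -- both checks pass: one step of each pass, then the IH
        have h1 : chainC prev (w :: ws) i = chainC (pvLastC w) ws (i + 1) := by
          simp [chainC, hc]
        have h2 : dupB (w :: ws) used i = dupB ws (PySem.Set.add used w) (i + 1) := by
          simp [dupB, hd]
        have hlen : i + (w :: ws).length = (i + 1) + ws.length := by
          simp only [List.length_cons]; omega
        have hstep : solutionLoopA n (w :: ws) used prev (i : Int) =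
            solutionLoopA n ws (PySem.Set.add used w) (pvLastC w) ((i : Int) + 1) := by
          simp [solutionLoopA, PySem.Set.contains_eq_listContains, List.contains_eq_mem, hd, hc]
        have hcast : (i : Int) + 1 = ((i + 1 : Nat) : Int) := by push_cast; ring
        rw [hstep, h1, h2, hlen, hcast]
        exact ih (PySem.Set.add used w) (pvLastC w) (i + 1)
      · -- chain break: A returns here, chainC stops at i
        have h1 : chainC prev (w :: ws) i = i := by simp [chainC, hc]
        have h2 : i ≤ dupB (w :: ws) used i := le_dupB _ _ _
        have h3 : min (chainC prev (w :: ws) i) (dupB (w :: ws) used i) = i := by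
          rw [h1]; omega
        simp [solutionLoopA, hd, hc, h3]

lemma solution_eq_alt (n : Int) (words : List String) (hhd : words.getD 0 "" ≠ "") :
    solution n words = solution_alt n words := by
  cases words with
  | nil => simp [solution, solution_alt, dupB]
  | cons w0 rest =>
    have hne : w0.toList ≠ [] := by
      intro h
      exact hhd (by simpa using String.toList_inj.mp (by simp [h]))
    have hlast := pyGet_neg_one_of_ne_nil w0 hne
    have hstart : dupB (w0 :: rest) PySem.Set.empty 0 =
        dupB rest (PySem.Set.add PySem.Set.empty w0) 1 := by
      simp [dupB, PySem.Set.empty]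
    have h := loopA_eq n rest (PySem.Set.add PySem.Set.empty w0) (pvLastC w0) 1
    simp only [Nat.cast_one] at h
    simp only [solution, solution_alt, hstart,
      chainBreakB_eq_chainC rest w0 (pvLastC w0) 1 hlast, h,
      List.length_cons, Nat.add_comm 1 rest.length]

-- ===== VERDICT (by name: the statement is the Claim_ definition above) =====
theorem solution_spec : Claim_equal_solution := by
  intro n words _ hpre
  unfold Spec_solution
  obtain ⟨hne, hemp, _⟩ := hpre
  apply solution_eq_alt
  intro h0
  cases words with
  | nil => exact hne rfl
  | cons w0 rest =>
    obtain ⟨i, hi, _⟩ := hemp 0 (by simp) h0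
    omega
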